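-- pv_equiv track=rewrite | github.com/UOR-Foundation/uor-evolution | modules/pure_mathematical_consciousness/mathematical_consciousness_core.py | _derive_properties
-- ===== SOURCE A (Python) =====
-- from typing import Dict, List, Optional, Tuple, Any, Set, Union
--
-- def _derive_properties(number: Union[int, float, complex]) -> List[str]:
--     """Derive properties of number"""
--     properties = []
--
--     if isinstance(number, int):
--         if number > 0:
--             properties.append("positive")
--         elif number < 0:
--             properties.append("negative")
--         else:
--             properties.append("zero")
--
--         if number > 1 and sum(i for i in range(1, number) if number % i == 0) == number:
--             properties.append("perfect")
--
--     return properties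
-- ===== SOURCE B (Python) =====
-- def _derive_properties(number):
--     """Derive properties of number"""
--     properties = []
--
--     if isinstance(number, int):
--         if number > 0:
--             properties.append("positive")
--         elif number < 0:
--             properties.append("negative")
--         else:
--             properties.append("zero")
--
--         if number > 1:
--             s = 1
--             i = 2
--             while i * i <= number:
--                 if number % i == 0:
--                     j = number // i
--                     s += i
--                     if j != i:
--                         s += j
--                 i += 1
--             if s == number:
--                 properties.append("perfect")
--
--     return properties
-- ===== Notes on version B (the rewrite author's own statement) =====
-- stated objective: faster
-- what changed: The perfect-number test sums divisor pairs (d, n//d) while d*d <= n instead of scanning every i in range(1, n).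
import Mathlib
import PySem

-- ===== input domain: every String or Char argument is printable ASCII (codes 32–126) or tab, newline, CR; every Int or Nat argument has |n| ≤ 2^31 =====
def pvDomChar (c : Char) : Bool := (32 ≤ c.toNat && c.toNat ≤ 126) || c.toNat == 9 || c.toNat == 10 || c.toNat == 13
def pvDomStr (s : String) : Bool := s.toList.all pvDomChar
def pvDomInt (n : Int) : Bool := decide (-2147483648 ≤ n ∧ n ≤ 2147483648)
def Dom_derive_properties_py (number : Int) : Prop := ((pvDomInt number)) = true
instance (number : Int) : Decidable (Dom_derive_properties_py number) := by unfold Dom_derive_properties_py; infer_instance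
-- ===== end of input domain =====

-- B replaces A's O(n) scan of range(1, n) by an O(√n) divisor-pair sum (i, n//i) for i*i ≤ n.

-- ===== PORT A =====
def derive_properties_py (number : Int) : List String :=
  let properties : List String := []
  let properties :=
    if number > 0 then properties ++ ["positive"]
    else if number < 0 then properties ++ ["negative"]
    else properties ++ ["zero"]
  if number > 1 ∧
      ((PySem.List.pyRange 1 number 1).filter
        (fun i => PySem.Int.mod number i == 0)).foldl (· + ·) 0 = number then
    properties ++ ["perfect"]
  else properties

-- ===== PORT B =====
-- the while loop of Source B: state (i, s), runs while i*i ≤ n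
def pvAltLoop (n i s : Int) : Int :=
  if i * i ≤ n then
    if PySem.Int.mod n i == 0 then
      let j := PySem.Int.floordiv n i
      pvAltLoop n (i + 1) (if j ≠ i then s + i + j else s + i)
    else pvAltLoop n (i + 1) s
  else s
termination_by (n + 1 - i).toNat
decreasing_by
  all_goals
    have hin : i ≤ n := by nlinarith [sq_nonneg i, sq_nonneg (i - 1)]
    omega

def derive_properties_py_alt (number : Int) : List String :=
  let properties : List String := []
  let properties :=
    if number > 0 then properties ++ ["positive"]
    else if number < 0 then properties ++ ["negative"]
    else properties ++ ["zero"]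
  if number > 1 then
    if pvAltLoop number 2 1 = number then properties ++ ["perfect"]
    else properties
  else properties

-- ===== PRECONDITION & SPEC =====
def Spec_derive_properties_py (number : Int) (out : List String) : Prop := out = derive_properties_py_alt number
instance (number : Int) (out : List String) : Decidable (Spec_derive_properties_py number out) := by unfold Spec_derive_properties_py; infer_instance

-- ===== CLAIM (what is proved, stated in full; the proofs are below) =====
def Claim_equal_derive_properties_py : Prop := ∀ (number : Int), Dom_derive_properties_py number → Spec_derive_properties_py number (derive_properties_py number)

-- ===== LEMMAS AND PROOFS =====

-- A's divisor scan up to an arbitrary bound b, as a ℤ-valued Finset sum.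
lemma pvA_sum (N : ℕ) (hN : 1 ≤ N) : ∀ b : ℕ,
    ((PySem.List.pyRange 1 (b : Int) 1).filter
        (fun i => PySem.Int.mod (N : Int) i == 0)).foldl (· + ·) 0
      = ∑ d ∈ (Finset.Ico 1 b).filter (· ∣ N), (d : ℤ) := by
  intro b
  induction b with
  | zero => simp [PySem.List.pyRange_one_eq_nil (by norm_num : (0:ℤ) ≤ 1)]
  | succ b ih =>
    rcases Nat.eq_zero_or_pos b with hb | hb
    · subst hb
      simp [PySem.List.pyRange_one_eq_nil (le_refl (1:ℤ))]
    · have h1 : (1:ℤ) ≤ (b:ℤ) := by exact_mod_cast hb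
      have hc : ((b+1:ℕ) : ℤ) = (b:ℤ) + 1 := by push_cast; ring
      rw [hc, PySem.List.pyRange_one_succ_right h1, List.filter_append,
        List.foldl_append, ih]
      simp only [Finset.sum_filter, Finset.sum_Ico_succ_top (show 1 ≤ b by omega)]
      by_cases hd : b ∣ N
      · have hm : N % b = 0 := Nat.mod_eq_zero_of_dvd hd
        simp [List.filter_singleton, PySem.Int.mod_natCast, hm, hd]
      · have hm : N % b ≠ 0 := fun h => hd (Nat.dvd_of_mod_eq_zero h)
        have hz : ¬ ((N:ℤ) % (b:ℤ) = 0) := by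
          rw [← Int.natCast_mod]; exact_mod_cast hm
        simp [List.filter_singleton, PySem.Int.mod_natCast, hz, hd]


-- B's loop as a ℤ-valued Finset sum over [i, sqrt N].
lemma pvB_loop (N : ℕ) (hN : 1 ≤ N) : ∀ fuel i : ℕ, 2 ≤ i → Nat.sqrt N + 1 - i ≤ fuel →
    ∀ s : ℤ, pvAltLoop (N : Int) (i : Int) s
      = s + ∑ k ∈ (Finset.Ico i (Nat.sqrt N + 1)).filter (· ∣ N),
          ((k : ℤ) + if N / k ≠ k then ((N / k : ℕ) : ℤ) else 0) := by
  intro fuel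
  induction fuel with
  | zero =>
    intro i h2 hf s
    have hgt : Nat.sqrt N < i := by omega
    have hguard : ¬ ((i:ℤ) * (i:ℤ) ≤ (N:ℤ)) := by
      have h : N < i * i := by simpa [pow_two] using Nat.sqrt_lt'.mp hgt
      exact_mod_cast not_le.mpr h
    rw [pvAltLoop, if_neg hguard]
    have : Finset.Ico i (Nat.sqrt N + 1) = ∅ := Finset.Ico_eq_empty (by omega)
    simp [this]
  | succ fuel ih =>
    intro i h2 hf s
    by_cases hle : i ≤ Nat.sqrt N
    · have hlei : i * i ≤ N := Nat.le_sqrt.mp hle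
      have hguard : ((i:ℤ) * (i:ℤ) ≤ (N:ℤ)) := by exact_mod_cast hlei
      rw [pvAltLoop, if_pos hguard]
      have hci : ((i:ℤ) + 1) = ((i+1 : ℕ) : ℤ) := by push_cast; ring
      have hrec := fun s' => ih (i+1) (by omega) (by omega) s'
      simp only [Finset.sum_filter] at hrec ⊢
      rw [Finset.sum_eq_sum_Ico_succ_bot (by omega : i < Nat.sqrt N + 1)]
      rw [show PySem.Int.mod (N:Int) (i:Int) = ((N % i : ℕ):ℤ) from PySem.Int.mod_natCast N i]
      by_cases hd : i ∣ N
      · have hm : N % i = 0 := Nat.mod_eq_zero_of_dvd hd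
        rw [hm]
        simp only [Nat.cast_zero, beq_self_eq_true, if_pos]
        rw [show PySem.Int.floordiv (N:Int) (i:Int) = ((N / i : ℕ):ℤ) from PySem.Int.floordiv_natCast N i]
        rw [hci, hrec]
        by_cases hq : N / i = i
        · simp [hq, hd]; ring
        · have hq' : ¬ ((N:ℤ)/(i:ℤ) = (i:ℤ)) := by
            rw [← Int.natCast_div]; exact_mod_cast hq
          simp [hq, hd, hq']; ring
      · have hm : N % i ≠ 0 := fun h => hd (Nat.dvd_of_mod_eq_zero h)
        have hm' : ¬ (((N % i : ℕ):ℤ) = 0) := by exact_mod_cast hm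
        rw [if_neg (by simpa using hm')]
        rw [hci, hrec]
        simp [hd]
    · have hguard : ¬ ((i:ℤ) * (i:ℤ) ≤ (N:ℤ)) := by
        have h : N < i * i := by
          simpa [pow_two] using Nat.sqrt_lt'.mp (by omega : Nat.sqrt N < i)
        exact_mod_cast not_le.mpr h
      rw [pvAltLoop, if_neg hguard]
      have : Finset.Ico i (Nat.sqrt N + 1) = ∅ := Finset.Ico_eq_empty (by omega)
      simp [this]


-- the √-pairing identity: the proper-divisor sum equals 1 plus the paired sum over 2 ≤ k ≤ √N.
lemma pvPairing (N : ℕ) (hN : 2 ≤ N) :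
    ∑ d ∈ (Finset.Ico 1 N).filter (· ∣ N), (d : ℤ)
      = 1 + ∑ k ∈ (Finset.Ico 2 (Nat.sqrt N + 1)).filter (· ∣ N),
          ((k : ℤ) + if N / k ≠ k then ((N / k : ℕ) : ℤ) else 0) := by
  have hN0 : N ≠ 0 := by omega
  set Q := Nat.sqrt N with hQ
  have hQ1 : 1 ≤ Q := by
    have : 1 * 1 ≤ N := by omega
    exact Nat.le_sqrt.mpr this
  -- split the proper-divisor sum at d*d ≤ N
  have hsplit :
      ∑ d ∈ ((Finset.Ico 1 N).filter (· ∣ N)).filter (fun d => d * d ≤ N), (d:ℤ)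
        + ∑ d ∈ ((Finset.Ico 1 N).filter (· ∣ N)).filter (fun d => ¬ d * d ≤ N), (d:ℤ)
      = ∑ d ∈ (Finset.Ico 1 N).filter (· ∣ N), (d:ℤ) :=
    Finset.sum_filter_add_sum_filter_not _ _ _
  -- the small part is the divisors in [1, Q]
  have hS : ((Finset.Ico 1 N).filter (· ∣ N)).filter (fun d => d * d ≤ N)
      = (Finset.Ico 1 (Q + 1)).filter (· ∣ N) := by
    ext d
    simp only [Finset.mem_filter, Finset.mem_Ico]
    constructor
    · rintro ⟨⟨⟨h1, h2⟩, h3⟩, h4⟩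
      have : d ≤ Q := Nat.le_sqrt.mpr h4
      exact ⟨⟨h1, by omega⟩, h3⟩
    · rintro ⟨⟨h1, h2⟩, h3⟩
      have hdd : d * d ≤ N := Nat.le_sqrt.mp (by omega)
      have hdN : d < N := by nlinarith
      exact ⟨⟨⟨h1, hdN⟩, h3⟩, hdd⟩
  -- the large part is, via d ↦ N/d, the strict small divisors in [2, Q]
  have hL : ∑ d ∈ ((Finset.Ico 1 N).filter (· ∣ N)).filter (fun d => ¬ d * d ≤ N), (d:ℤ)
      = ∑ k ∈ (Finset.Ico 2 (Q + 1)).filter (fun k => k ∣ N ∧ ¬ N / k = k), ((N / k : ℕ) : ℤ) := by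
    refine Finset.sum_nbij' (i := fun d => N / d) (j := fun k => N / k) ?_ ?_ ?_ ?_ ?_
    · intro d hd
      simp only [Finset.mem_filter, Finset.mem_Ico] at hd ⊢
      obtain ⟨⟨⟨h1, h2⟩, h3⟩, h4⟩ := hd
      have hmul : N / d * d = N := Nat.div_mul_cancel h3
      have hk1 : 1 ≤ N / d := Nat.one_le_div_iff (by omega) |>.mpr (by omega)
      have hkd : N / d < d := by nlinarith
      have hkk : N / d * (N / d) < N := by nlinarith
      have hk2 : 2 ≤ N / d := by
        rcases Nat.lt_or_ge (N / d) 2 with h | h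
        · interval_cases h' : (N / d) <;> omega
        · exact h
      have hkQ : N / d ≤ Q := Nat.le_sqrt.mpr (by omega)
      have hdiv : N / (N / d) = d := Nat.div_div_self h3 hN0
      exact ⟨⟨hk2, by omega⟩, ⟨⟨d, hmul.symm⟩, by omega⟩⟩
    · intro k hk
      simp only [Finset.mem_filter, Finset.mem_Ico] at hk ⊢
      obtain ⟨⟨h2, hQk⟩, h3, hne⟩ := hk
      have hmul : N / k * k = N := Nat.div_mul_cancel h3
      have hkk : k * k ≤ N := Nat.le_sqrt.mp (by omega)
      have hge : k ≤ N / k :=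
        Nat.le_of_mul_le_mul_right (by nlinarith) (by omega : 0 < k)
      have hdk : k < N / k := lt_of_le_of_ne hge (fun h => hne h.symm)
      have hdd : N < (N / k) * (N / k) := by nlinarith
      have hdN : N / k < N := by nlinarith
      exact ⟨⟨⟨by omega, hdN⟩, ⟨k, hmul.symm⟩⟩, by omega⟩
    · intro d hd
      simp only [Finset.mem_filter, Finset.mem_Ico] at hd
      exact Nat.div_div_self hd.1.2 hN0
    · intro k hk
      simp only [Finset.mem_filter, Finset.mem_Ico] at hk
      exact Nat.div_div_self hk.2.1 hN0
    · intro d hd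
      simp only [Finset.mem_filter, Finset.mem_Ico] at hd
      rw [Nat.div_div_self hd.1.2 hN0]
  -- peel the divisor 1 off the small part
  have hI : ∑ d ∈ (Finset.Ico 1 (Q + 1)).filter (· ∣ N), (d:ℤ)
      = 1 + ∑ k ∈ (Finset.Ico 2 (Q + 1)).filter (· ∣ N), (k:ℤ) := by
    simp only [Finset.sum_filter]
    rw [Finset.sum_eq_sum_Ico_succ_bot (show 1 < Q + 1 by omega)]
    simp
  -- the conditional pair term is the sum over the strict small divisors
  have hIte : ∑ k ∈ (Finset.Ico 2 (Q + 1)).filter (· ∣ N),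
        (if N / k ≠ k then ((N / k : ℕ) : ℤ) else 0)
      = ∑ k ∈ (Finset.Ico 2 (Q + 1)).filter (fun k => k ∣ N ∧ ¬ N / k = k), ((N / k : ℕ) : ℤ) := by
    simp only [Finset.sum_filter]
    refine Finset.sum_congr rfl ?_
    intro k _
    by_cases h3 : k ∣ N <;> by_cases hne : N / k = k <;> simp [h3, hne]
  rw [← hsplit, hS, hI, hL, ← hIte, Finset.sum_add_distrib]
  ring


-- ===== VERDICT (by name: the statement is the Claim_ definition above) =====
theorem derive_properties_py_spec : Claim_equal_derive_properties_py := by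
  intro number _
  unfold Spec_derive_properties_py derive_properties_py derive_properties_py_alt
  by_cases h1 : number > 1
  · have hpos : number > 0 := by omega
    obtain ⟨N, rfl⟩ : ∃ N : ℕ, number = (N : Int) := ⟨number.toNat, by omega⟩
    have hN : 2 ≤ N := by exact_mod_cast h1
    have hsum :
        ((PySem.List.pyRange 1 (N : Int) 1).filter
            (fun i => PySem.Int.mod (N : Int) i == 0)).foldl (· + ·) 0
          = pvAltLoop (N : Int) 2 1 := by
      rw [pvA_sum N (by omega) N, pvPairing N hN,
        show ((2:ℤ)) = ((2:ℕ):ℤ) by norm_num,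
        pvB_loop N (by omega) (Nat.sqrt N + 1) 2 (by omega) (by omega) 1]
    simp only [h1, hpos, hsum, true_and, if_pos]
  · simp [h1]
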